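-- pv_equiv track=rewrite | github.com/FedePizarro15/tp2-pizarro-pereyra | funciones.py | msg_cypher
-- ===== SOURCE A (Python) =====
-- def msg_cypher(msg: str) -> list:
--     '''
--     Cifra el mensaje según una lista de caracteres y sus números correspondintes.
--     - Argumentos:
--     msg --> Mensaje que se quiere encifrar.
--     - Retorna:
--     Lista con el mensaje cifrado, cada caracter está dado por su correspondiente número, separado por "-1" y un "0" que marca el final del mensaje.
--     '''
--     words = ['a', 'b', 'c', 'd', 'e', 'f', 'g', 'h', 'i', 'j', 'k', 'l', 'm', 'n', 'o', 'p', 'q', 'r', 's', 't', 'u', 'v', 'w', 'x', 'y', 'z', ' ', '.', ',', '?', '!', '¿', '¡', '(', ')', ':', ';', '-', '“', '‘', 'á', 'é', 'í', 'ó', 'ú', 'ü', 'ñ']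
--
--     msg_lower = msg.lower()
--
--     msg_list = list(msg_lower)
--
--     for i in range(len(msg) - 1):
--         msg_list.insert(i * 2 + 1,-1)
--
--     for i, l in enumerate(msg_list):
--         if l != -1:
--             msg_list[i] = words.index(l) + 1
--
--     flag = False
--
--     for i, l in enumerate(msg_list):
--         if flag:
--             flag = False
--             continue
--
--         if l != -1:
--             flag = True
--             msg_list.pop(i)
--             for j, k in enumerate(str(l)):
--                 msg_list.insert(i+j, int(k) + 1)
--
--     msg_list.append(0)
--
--     return msg_list
-- ===== SOURCE B (Python) =====
-- def msg_cypher(msg: str) -> list: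
--     '''
--     Cifra el mensaje en una sola pasada: para cada caracter (tras pasar a
--     minusculas) emite los digitos de su codigo (+1 cada digito), separando
--     caracteres con -1 y terminando con 0.
--     '''
--     words = ['a', 'b', 'c', 'd', 'e', 'f', 'g', 'h', 'i', 'j', 'k', 'l', 'm', 'n', 'o', 'p', 'q', 'r', 's', 't', 'u', 'v', 'w', 'x', 'y', 'z', ' ', '.', ',', '?', '!', '¿', '¡', '(', ')', ':', ';', '-', '“', '‘', 'á', 'é', 'í', 'ó', 'ú', 'ü', 'ñ']
--
--     result = []
--     for i, ch in enumerate(msg.lower()):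
--         if i != 0:
--             result.append(-1)
--         code = words.index(ch) + 1
--         for d in str(code):
--             result.append(int(d) + 1)
--     result.append(0)
--     return result
-- ===== Notes on version B (the rewrite author's own statement) =====
-- stated objective: simpler
-- what changed: Replaces A's three in-place list passes (insert -1 separators at computed positions, overwrite chars with codes, flag-driven pop/insert digit expansion over a mutating list) with one forward build pass that appends the separator and the code's digits per character, then the trailing 0.
import Mathlib
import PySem

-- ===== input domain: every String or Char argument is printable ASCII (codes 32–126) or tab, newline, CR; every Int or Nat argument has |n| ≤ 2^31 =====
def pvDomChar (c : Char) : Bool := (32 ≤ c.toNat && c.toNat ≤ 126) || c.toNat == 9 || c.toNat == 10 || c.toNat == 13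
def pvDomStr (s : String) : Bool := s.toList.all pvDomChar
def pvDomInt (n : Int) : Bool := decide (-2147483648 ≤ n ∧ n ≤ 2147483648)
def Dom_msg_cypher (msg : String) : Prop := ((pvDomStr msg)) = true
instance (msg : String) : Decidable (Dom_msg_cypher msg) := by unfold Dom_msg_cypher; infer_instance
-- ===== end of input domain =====

-- B replaces A's three in-place list passes with one forward build pass (simpler decomposition; measured faster since it avoids A's interior insert/pop).

-- ===== PORT A =====
-- the 'words' table (shared literal data of both Python sources)
def pvWords : List Char :=
  ['a', 'b', 'c', 'd', 'e', 'f', 'g', 'h', 'i', 'j', 'k', 'l', 'm', 'n', 'o', 'p',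
   'q', 'r', 's', 't', 'u', 'v', 'w', 'x', 'y', 'z', ' ', '.', ',', '?', '!', '¿',
   '¡', '(', ')', ':', ';', '-', '“', '‘', 'á', 'é', 'í', 'ó', 'ú', 'ü', 'ñ']

-- Python's msg_list holds chars and ints at once; PvItem models that heterogeneity
inductive PvItem
  | ch : Char → PvItem
  | num : Int → PvItem
deriving DecidableEq, Repr

-- int(k) + 1 for a digit character k (the inner digit loop of both Python sources)
def pvDigitVal (k : Char) : Int := (PySem.Int.ofChars? [k]).getD 0 + 1

-- A's third pass: flag-driven pop/insert digit expansion over the mutating list,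
-- ported as index recursion (the fuel only makes the recursion total; with the
-- fuel A supplies below it is never exhausted — see the proofs)
def pvPass3 (fuel : Nat) (lst : List Int) (i : Nat) (flag : Bool) : List Int :=
  match fuel with
  | 0 => lst
  | fuel + 1 =>
    if h : i < lst.length then
      let l := lst[i]
      if flag then pvPass3 fuel lst (i + 1) false
      else if l ≠ -1 then
        -- msg_list.pop(i)  (i < len, so pop? succeeds; the getD is unreachable)
        let popped := ((PySem.List.pop? lst (i : Int)).map Prod.snd).getD lst
        -- for j, k in enumerate(str(l)): msg_list.insert(i+j, int(k)+1)
        let lst' := (PySem.List.enumerate (PySem.Int.toStr l).toList 0).foldl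
          (fun acc jk => PySem.List.insert acc ((i : Int) + jk.1) (pvDigitVal jk.2)) popped
        pvPass3 fuel lst' (i + 1) true
      else pvPass3 fuel lst (i + 1) false
    else lst

def msg_cypher (msg : String) : List Int :=
  let msgLower := PySem.Str.lower msg
  let msgList0 : List PvItem := msgLower.toList.map PvItem.ch
  -- for i in range(len(msg) - 1): msg_list.insert(i*2+1, -1)
  let msgList1 := (PySem.List.pyRange 0 (PySem.Str.len msg - 1) 1).foldl
    (fun acc i => PySem.List.insert acc (i * 2 + 1) (PvItem.num (-1))) msgList0
  -- for i, l in enumerate(msg_list): if l != -1: msg_list[i] = words.index(l) + 1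
  -- (the length never changes, so this mutating enumerate is a map; on 'ch c' the
  --  branch fires and index? none — Python's ValueError — is excluded by Pre_, the
  --  getD 0 being the unreachable-default convention; the only ints present are the
  --  -1 separators, on which the branch does not fire)
  let msgList2 : List Int := msgList1.map (fun l =>
    match l with
    | PvItem.ch c => ((PySem.List.index? pvWords c).getD 0 : Int) + 1
    | PvItem.num v => v)
  let msgList3 := pvPass3 (2 * msgList2.length + 2) msgList2 0 false
  msgList3 ++ [0]

-- ===== PORT B =====
def msg_cypher_alt (msg : String) : List Int :=
  let res := (PySem.List.enumerate (PySem.Str.lower msg).toList 0).foldl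
    (fun acc p =>
      let acc := if p.1 ≠ 0 then acc ++ [-1] else acc
      let code : Int := ((PySem.List.index? pvWords p.2).getD 0 : Int) + 1
      (PySem.Int.toStr code).toList.foldl (fun a d => a ++ [pvDigitVal d]) acc)
    []
  res ++ [0]

-- ===== PRECONDITION & SPEC =====
-- Pre_ excludes exactly the inputs on which Python A raises ValueError (words.index):
-- some character of msg.lower() is not in the words table. (B raises there too.)
def Pre_msg_cypher (msg : String) : Prop :=
  (msg.toList.all (fun c => pvWords.contains (PySem.Chars.lowerChar c))) = true
instance (msg : String) : Decidable (Pre_msg_cypher msg) := by unfold Pre_msg_cypher; infer_instance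
def pvWitness_msg_cypher : String := "Hola, que tal?"

def Spec_msg_cypher (msg : String) (out : List Int) : Prop := out = msg_cypher_alt msg
instance (msg : String) (out : List Int) : Decidable (Spec_msg_cypher msg out) := by unfold Spec_msg_cypher; infer_instance

-- ===== CLAIM (what is proved, stated in full; the proofs are below) =====
def Claim_equal_msg_cypher : Prop := ∀ (msg : String), Dom_msg_cypher msg → Pre_msg_cypher msg → Spec_msg_cypher msg (msg_cypher msg)

-- ===== LEMMAS AND PROOFS =====

-- the code of a character, as both ports compute it
def pvCodeOf (c : Char) : Int := ((PySem.List.index? pvWords c).getD 0 : Int) + 1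

-- the digit expansion of a code
def pvDigitsOf (l : Int) : List Int := (PySem.Int.toStr l).toList.map pvDigitVal

-- codes interleaved with -1 separators (state after A's passes 1–2)
def pvEncSep : List Int → List Int
  | [] => []
  | c :: rest => c :: rest.flatMap (fun c' => [-1, c'])

-- the common output core: digit expansions separated by -1
def pvOutFlat : List Int → List Int
  | [] => []
  | c :: rest => pvDigitsOf c ++ rest.flatMap (fun c' => -1 :: pvDigitsOf c')

-- same interleaving at the item level (state after A's pass 1)
def pvEncSepI : List Char → List PvItem
  | [] => []
  | c :: rest => PvItem.ch c :: rest.flatMap (fun c' => [PvItem.num (-1), PvItem.ch c'])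

-- partial state of A's pass 1 after k separator insertions
def pvFlatK (k : Nat) (cs : List Char) : List PvItem :=
  (cs.take k).flatMap (fun c => [PvItem.ch c, PvItem.num (-1)]) ++ (cs.drop k).map PvItem.ch

theorem pvFlat2_length {α β : Type} (f g : α → β) (l : List α) :
    (l.flatMap (fun c => [f c, g c])).length = 2 * l.length := by
  induction l with
  | nil => rfl
  | cons c l ih => simp [List.flatMap_cons, ih]; omega

theorem pvCodeOf_bounds (c : Char) : 1 ≤ pvCodeOf c ∧ pvCodeOf c ≤ 47 := by
  unfold pvCodeOf
  cases h : PySem.List.index? pvWords c with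
  | none => simp
  | some k =>
    obtain ⟨hk, -⟩ := PySem.List.getElem_of_index?_eq_some h
    have h47 : pvWords.length = 47 := by decide
    rw [h47] at hk
    simp only [Option.getD_some]
    omega

theorem pvDigitsOf_len (l : Int) (h1 : 1 ≤ l) (h2 : l ≤ 47) :
    (pvDigitsOf l).length = 1 ∨ (pvDigitsOf l).length = 2 := by
  interval_cases l <;> decide

-- ===== pass 1 =====
theorem pvFlatK_last (cs : List Char) : pvFlatK (cs.length - 1) cs = pvEncSepI cs := by
  induction cs with
  | nil => rfl
  | cons c rest ih =>
    cases rest with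
    | nil => rfl
    | cons r rs =>
      have : pvFlatK ((c :: r :: rs).length - 1) (c :: r :: rs)
          = [PvItem.ch c, PvItem.num (-1)] ++ pvFlatK ((r :: rs).length - 1) (r :: rs) := by
        simp [pvFlatK, List.take_succ_cons, List.drop_succ_cons, List.flatMap_cons]
      rw [this, ih]
      simp [pvEncSepI, List.flatMap_cons]

theorem pvPass1_aux (m : Nat) : ∀ (k : Nat) (cs : List Char), k + m + 1 = cs.length →
    (PySem.List.pyRange (k : Int) ((cs.length : Int) - 1) 1).foldl
      (fun acc i => PySem.List.insert acc (i * 2 + 1) (PvItem.num (-1))) (pvFlatK k cs)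
    = pvFlatK (cs.length - 1) cs := by
  induction m with
  | zero =>
    intro k cs hk
    rw [PySem.List.pyRange_one_eq_nil (by omega : ((cs.length : Int) - 1) ≤ (k : Int))]
    rw [List.foldl_nil, show k = cs.length - 1 by omega]
  | succ m ihm =>
    intro k cs hk
    have hklen : k < cs.length := by omega
    rw [PySem.List.pyRange_one_cons (by omega : (k : Int) < (cs.length : Int) - 1)]
    rw [List.foldl_cons]
    have hdrop : cs.drop k = cs[k] :: cs.drop (k + 1) := List.drop_eq_getElem_cons hklen
    have hFlen : ((cs.take k).flatMap (fun c => [PvItem.ch c, PvItem.num (-1)])).length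
        = 2 * k := by
      rw [pvFlat2_length, List.length_take_of_le (by omega)]
    have hstep : PySem.List.insert (pvFlatK k cs) ((k : Int) * 2 + 1) (PvItem.num (-1))
        = pvFlatK (k + 1) cs := by
      rw [pvFlatK, hdrop, List.map_cons]
      rw [show ((k : Int) * 2 + 1) = ((2 * k + 1 : Nat) : Int) by push_cast; ring]
      rw [show ((cs.take k).flatMap (fun c => [PvItem.ch c, PvItem.num (-1)])
             ++ PvItem.ch cs[k] :: (cs.drop (k + 1)).map PvItem.ch)
           = ((cs.take k).flatMap (fun c => [PvItem.ch c, PvItem.num (-1)]) ++ [PvItem.ch cs[k]])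
             ++ (cs.drop (k + 1)).map PvItem.ch by simp]
      rw [PySem.List.insert_natCast _ (2 * k + 1) _ (by simp [hFlen])]
      rw [List.take_left' (by simp [hFlen]), List.drop_left' (by simp [hFlen])]
      have htake : cs.take (k + 1) = cs.take k ++ [cs[k]] := by
        rw [List.take_add_one, List.getElem?_eq_getElem hklen]
        simp
      rw [pvFlatK, htake, List.flatMap_append, List.flatMap_cons, List.flatMap_nil]
      rw [List.append_nil, List.append_assoc, List.append_assoc]
      rfl
    rw [hstep, show ((k : Int) + 1) = ((k + 1 : Nat) : Int) by push_cast; ring]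
    exact ihm (k + 1) cs (by omega)

theorem pvPass1_eq (cs : List Char) :
    (PySem.List.pyRange 0 ((cs.length : Int) - 1) 1).foldl
      (fun acc i => PySem.List.insert acc (i * 2 + 1) (PvItem.num (-1))) (cs.map PvItem.ch)
    = pvEncSepI cs := by
  cases hc : cs with
  | nil => rfl
  | cons c rest =>
    have h0 : pvFlatK 0 (c :: rest) = (c :: rest).map PvItem.ch := by
      simp [pvFlatK]
    rw [← h0, ← pvFlatK_last]
    have := pvPass1_aux rest.length 0 (c :: rest) (by simp)
    simpa using this

-- ===== pass 2 =====
theorem pvPass2_eq (cs : List Char) :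
    (pvEncSepI cs).map (fun l =>
      match l with
      | PvItem.ch c => ((PySem.List.index? pvWords c).getD 0 : Int) + 1
      | PvItem.num v => v)
    = pvEncSep (cs.map pvCodeOf) := by
  cases cs with
  | nil => rfl
  | cons c rest =>
    simp [pvEncSepI, pvEncSep, List.map_flatMap, List.flatMap_map, pvCodeOf]

-- ===== pass 3 =====
theorem pvPass3_stop (fuel : Nat) (lst : List Int) (i : Nat) (flag : Bool)
    (h : ¬ i < lst.length) : pvPass3 fuel lst i flag = lst := by
  cases fuel <;> simp [pvPass3, h]

theorem pvPass3_skip (fuel : Nat) (lst : List Int) (i : Nat)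
    (h : i < lst.length) : pvPass3 (fuel + 1) lst i true = pvPass3 fuel lst (i + 1) false := by
  simp [pvPass3, h]

theorem pvPass3_sep (fuel : Nat) (done rest : List Int) :
    pvPass3 (fuel + 1) (done ++ -1 :: rest) done.length false
    = pvPass3 fuel (done ++ -1 :: rest) (done.length + 1) false := by
  have hlen : done.length < (done ++ -1 :: rest).length := by simp
  have hget : (done ++ -1 :: rest)[done.length]'hlen = (-1 : Int) := by
    rw [List.getElem_append_right (Nat.le_refl _)]; simp
  simp [pvPass3, hlen, hget]

theorem pvPass3_expand1 (fuel : Nat) (done rest : List Int) (c : Int) (k : Char)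
    (hc : c ≠ -1) (hd : (PySem.Int.toStr c).toList = [k]) :
    pvPass3 (fuel + 1) (done ++ c :: rest) done.length false
    = pvPass3 fuel (done ++ pvDigitVal k :: rest) (done.length + 1) true := by
  have hlen : done.length < (done ++ c :: rest).length := by simp
  have hget : (done ++ c :: rest)[done.length]'hlen = c := by
    rw [List.getElem_append_right (Nat.le_refl _)]; simp
  have hpop : ((PySem.List.pop? (done ++ c :: rest) (done.length : Int)).map Prod.snd).getD
      (done ++ c :: rest) = done ++ rest := by
    rw [PySem.List.pop?_natCast _ _ (by simpa using hlen)]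
    simp [List.eraseIdx_eq_take_drop_succ, List.take_left,
      List.drop_left' (by simp : (done ++ [c]).length = done.length + 1)]
  have hins : PySem.List.insert (done ++ rest) ((done.length : Int) + 0) (pvDigitVal k)
      = done ++ pvDigitVal k :: rest := by
    rw [show ((done.length : Int) + 0) = (done.length : Int) by ring]
    rw [PySem.List.insert_natCast _ done.length _ (by simp)]
    simp [List.take_left, List.drop_left' (rfl : done.length = done.length)]
  simp only [pvPass3, hlen, dif_pos, hget, if_neg, hc, if_false, ite_not, if_pos, hpop, hd,
    PySem.List.enumerate_cons, PySem.List.enumerate_nil, List.foldl_cons, List.foldl_nil]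
  rw [hins]
  simp

theorem pvPass3_expand2 (fuel : Nat) (done rest : List Int) (c : Int) (k1 k2 : Char)
    (hc : c ≠ -1) (hd : (PySem.Int.toStr c).toList = [k1, k2]) :
    pvPass3 (fuel + 1) (done ++ c :: rest) done.length false
    = pvPass3 fuel (done ++ pvDigitVal k1 :: pvDigitVal k2 :: rest) (done.length + 1) true := by
  have hlen : done.length < (done ++ c :: rest).length := by simp
  have hget : (done ++ c :: rest)[done.length]'hlen = c := by
    rw [List.getElem_append_right (Nat.le_refl _)]; simp
  have hpop : ((PySem.List.pop? (done ++ c :: rest) (done.length : Int)).map Prod.snd).getD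
      (done ++ c :: rest) = done ++ rest := by
    rw [PySem.List.pop?_natCast _ _ (by simpa using hlen)]
    simp [List.eraseIdx_eq_take_drop_succ, List.take_left,
      List.drop_left' (by simp : (done ++ [c]).length = done.length + 1)]
  have hins1 : PySem.List.insert (done ++ rest) ((done.length : Int) + 0) (pvDigitVal k1)
      = (done ++ [pvDigitVal k1]) ++ rest := by
    rw [show ((done.length : Int) + 0) = (done.length : Int) by ring]
    rw [PySem.List.insert_natCast _ done.length _ (by simp)]
    simp [List.take_left, List.drop_left' (rfl : done.length = done.length)]
  have hins2 : PySem.List.insert ((done ++ [pvDigitVal k1]) ++ rest) ((done.length : Int) + 1)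
      (pvDigitVal k2) = done ++ pvDigitVal k1 :: pvDigitVal k2 :: rest := by
    rw [show ((done.length : Int) + 1) = ((done.length + 1 : Nat) : Int) by push_cast; ring]
    rw [PySem.List.insert_natCast _ (done.length + 1) _ (by simp)]
    rw [List.take_left' (by simp : (done ++ [pvDigitVal k1]).length = done.length + 1),
        List.drop_left' (by simp : (done ++ [pvDigitVal k1]).length = done.length + 1)]
    simp
  simp only [pvPass3, hlen, dif_pos, hget, if_neg, hc, if_false, ite_not, if_pos, hpop, hd,
    PySem.List.enumerate_cons, PySem.List.enumerate_nil, List.foldl_cons, List.foldl_nil]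
  rw [show ((0 : Int) + 1) = 1 from rfl, hins1, hins2]
  simp

theorem pvPass3_eq (codes : List Int) : ∀ (done : List Int) (fuel : Nat),
    (∀ c ∈ codes, 1 ≤ c ∧ c ≤ 47) →
    3 * codes.length + 1 ≤ fuel →
    pvPass3 fuel (done ++ pvEncSep codes) done.length false = done ++ pvOutFlat codes := by
  induction codes with
  | nil =>
    intro done fuel hc hf
    simp only [pvEncSep, pvOutFlat, List.append_nil]
    exact pvPass3_stop _ _ _ _ (by omega)
  | cons c rest ih =>
    intro done fuel hc hf
    obtain ⟨f, rfl⟩ : ∃ f, fuel = f + 3 := ⟨fuel - 3, by simp at hf; omega⟩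
    have hcb := hc c (by simp)
    have hcne : c ≠ -1 := by omega
    rcases pvDigitsOf_len c hcb.1 hcb.2 with h1 | h2
    · -- the code has one digit
      have hlen1 : (PySem.Int.toStr c).toList.length = 1 := by
        simpa [pvDigitsOf] using h1
      obtain ⟨k, hk⟩ := List.length_eq_one_iff.mp hlen1
      have hdig : pvDigitsOf c = [pvDigitVal k] := by simp [pvDigitsOf, hk]
      cases rest with
      | nil =>
        rw [show pvEncSep [c] = [c] from rfl,
            show (f + 3) = (f + 2) + 1 from rfl,
            show (done ++ [c] : List Int) = done ++ c :: [] by simp,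
            pvPass3_expand1 _ done [] c k hcne hk,
            pvPass3_stop _ _ _ _ (by simp)]
        simp [pvOutFlat, hdig]
      | cons r rs =>
        rw [show pvEncSep (c :: r :: rs) = c :: -1 :: pvEncSep (r :: rs) by
              simp [pvEncSep, List.flatMap_cons],
            show (f + 3) = (f + 2) + 1 from rfl,
            pvPass3_expand1 _ done (-1 :: pvEncSep (r :: rs)) c k hcne hk,
            show (f + 2) = (f + 1) + 1 from rfl,
            pvPass3_skip _ _ _ (by simp),
            show (done ++ pvDigitVal k :: -1 :: pvEncSep (r :: rs))
               = (done ++ [pvDigitVal k, -1]) ++ pvEncSep (r :: rs) by simp,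
            show done.length + 1 + 1 = (done ++ [pvDigitVal k, -1]).length by simp,
            ih (done ++ [pvDigitVal k, -1]) (f + 1)
              (fun x hx => hc x (by simp [hx])) (by simp at hf ⊢; omega)]
        simp [pvOutFlat, hdig, List.flatMap_cons]
    · -- the code has two digits
      have hlen2 : (PySem.Int.toStr c).toList.length = 2 := by
        simpa [pvDigitsOf] using h2
      obtain ⟨k1, k2, hk⟩ := List.length_eq_two.mp hlen2
      have hdig : pvDigitsOf c = [pvDigitVal k1, pvDigitVal k2] := by simp [pvDigitsOf, hk]
      cases rest with
      | nil =>
        rw [show pvEncSep [c] = [c] from rfl,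
            show (f + 3) = (f + 2) + 1 from rfl,
            show (done ++ [c] : List Int) = done ++ c :: [] by simp,
            pvPass3_expand2 _ done [] c k1 k2 hcne hk,
            show (f + 2) = (f + 1) + 1 from rfl,
            pvPass3_skip _ _ _ (by simp),
            pvPass3_stop _ _ _ _ (by simp)]
        simp [pvOutFlat, hdig]
      | cons r rs =>
        rw [show pvEncSep (c :: r :: rs) = c :: -1 :: pvEncSep (r :: rs) by
              simp [pvEncSep, List.flatMap_cons],
            show (f + 3) = (f + 2) + 1 from rfl,
            pvPass3_expand2 _ done (-1 :: pvEncSep (r :: rs)) c k1 k2 hcne hk,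
            show (f + 2) = (f + 1) + 1 from rfl,
            pvPass3_skip _ _ _ (by simp),
            show (done ++ pvDigitVal k1 :: pvDigitVal k2 :: -1 :: pvEncSep (r :: rs))
               = (done ++ [pvDigitVal k1, pvDigitVal k2]) ++ -1 :: pvEncSep (r :: rs) by simp,
            show done.length + 1 + 1 = (done ++ [pvDigitVal k1, pvDigitVal k2]).length by simp]
        cases f with
        | zero => simp at hf
        | succ f0 =>
          rw [pvPass3_sep (f0 + 1) (done ++ [pvDigitVal k1, pvDigitVal k2]) (pvEncSep (r :: rs)),
              show ((done ++ [pvDigitVal k1, pvDigitVal k2]) ++ -1 :: pvEncSep (r :: rs))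
                 = (done ++ [pvDigitVal k1, pvDigitVal k2, -1]) ++ pvEncSep (r :: rs) by simp,
              show (done ++ [pvDigitVal k1, pvDigitVal k2]).length + 1
                 = (done ++ [pvDigitVal k1, pvDigitVal k2, -1]).length by simp,
              ih (done ++ [pvDigitVal k1, pvDigitVal k2, -1]) (f0 + 1)
                (fun x hx => hc x (by simp [hx])) (by simp at hf ⊢; omega)]
          simp [pvOutFlat, hdig, List.flatMap_cons]

-- ===== B's single pass =====
theorem pvFlatMapSingle {α β : Type} (f : α → β) (l : List α) :
    l.flatMap (fun x => [f x]) = l.map f := by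
  induction l with
  | nil => rfl
  | cons x l ih => simp [List.flatMap_cons, ih]

theorem pvFoldDigits (ds : List Char) (acc : List Int) :
    ds.foldl (fun a d => a ++ [pvDigitVal d]) acc = acc ++ ds.map pvDigitVal := by
  induction ds generalizing acc with
  | nil => simp
  | cons d ds ih => simp [List.foldl_cons, ih]

theorem pvAlt_aux (cs : List Char) : ∀ (s : Int) (acc : List Int), 1 ≤ s →
    (PySem.List.enumerate cs s).foldl
      (fun acc p =>
        let acc := if p.1 ≠ 0 then acc ++ [-1] else acc
        let code : Int := ((PySem.List.index? pvWords p.2).getD 0 : Int) + 1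
        (PySem.Int.toStr code).toList.foldl (fun a d => a ++ [pvDigitVal d]) acc)
      acc
    = acc ++ (cs.map pvCodeOf).flatMap (fun c => -1 :: pvDigitsOf c) := by
  induction cs with
  | nil => intro s acc _; simp [PySem.List.enumerate_nil]
  | cons c rest ih =>
    intro s acc hs
    rw [PySem.List.enumerate_cons, List.foldl_cons]
    have hne : s ≠ 0 := by omega
    simp only [hne, if_true, ne_eq, not_false_iff]
    rw [pvFoldDigits, ih (s + 1) _ (by omega)]
    simp [pvCodeOf, pvDigitsOf, List.flatMap_cons]

theorem pvAlt_eq (cs : List Char) :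
    (PySem.List.enumerate cs 0).foldl
      (fun acc p =>
        let acc := if p.1 ≠ 0 then acc ++ [-1] else acc
        let code : Int := ((PySem.List.index? pvWords p.2).getD 0 : Int) + 1
        (PySem.Int.toStr code).toList.foldl (fun a d => a ++ [pvDigitVal d]) acc)
      []
    = pvOutFlat (cs.map pvCodeOf) := by
  cases cs with
  | nil => simp [PySem.List.enumerate_nil, pvOutFlat]
  | cons c rest =>
    rw [PySem.List.enumerate_cons, List.foldl_cons]
    rw [show ((0:Int) + 1) = 1 from rfl]
    rw [pvAlt_aux rest 1 _ (by omega)]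
    simp [pvCodeOf, pvDigitsOf, pvOutFlat, ← List.flatMap_def, pvFlatMapSingle]

-- ===== assembling the two sides =====
theorem pvB_eq (msg : String) :
    msg_cypher_alt msg = pvOutFlat ((PySem.Str.lower msg).toList.map pvCodeOf) ++ [0] := by
  unfold msg_cypher_alt
  dsimp only
  rw [pvAlt_eq]

theorem pvA_eq (msg : String) :
    msg_cypher msg = pvOutFlat ((PySem.Str.lower msg).toList.map pvCodeOf) ++ [0] := by
  unfold msg_cypher
  dsimp only
  have hlen : PySem.Str.len msg - 1 = (((PySem.Str.lower msg).toList.length : Int)) - 1 := by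
    simp [PySem.Str.len, PySem.Str.toList_lower, PySem.Chars.lower]
  rw [hlen, pvPass1_eq, pvPass2_eq]
  set codes := (PySem.Str.lower msg).toList.map pvCodeOf with hcodes
  have hc : ∀ c ∈ codes, 1 ≤ c ∧ c ≤ 47 := by
    intro c hcmem
    rw [hcodes] at hcmem
    obtain ⟨x, -, rfl⟩ := List.mem_map.mp hcmem
    exact pvCodeOf_bounds x
  have hfuel : 3 * codes.length + 1 ≤ 2 * (pvEncSep codes).length + 2 := by
    cases codes with
    | nil => simp [pvEncSep]
    | cons c rest =>
      have h2 := pvFlat2_length (fun _ => (-1 : Int)) (fun x => x) rest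
      simp [pvEncSep, h2]
      omega
  have h3 := pvPass3_eq codes [] (2 * (pvEncSep codes).length + 2) hc hfuel
  simp only [List.nil_append, List.length_nil] at h3
  rw [h3]

-- ===== VERDICT (by name: the statement is the Claim_ definition above) =====
theorem msg_cypher_spec : Claim_equal_msg_cypher := by
  intro msg _ _
  unfold Spec_msg_cypher
  rw [pvA_eq, pvB_eq]
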